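-- pv_equiv track=rewrite | github.com/magnusdv/filtus | filtus/FiltusUtils.py | interval_union
-- ===== SOURCE A (Python) =====
-- def interval_union(x):
--     '''
--     Union of intervals.
--     x: a sequence of intervals of the form (start, end) or [start, end]
--     output: list of union intervals
--     '''
--     z = sorted(x, reverse=1) # to use pop()
--     res = []
--     a,b = z.pop()
--     while z:
--         c,d = z.pop()
--         if c <= b:
--             b = max(b,d)
--         else:
--             res.append([a,b])
--             a,b = c,d
--     res.append([a,b])
--     return res
-- ===== SOURCE B (Python) =====
-- def interval_union(x):
--     '''
--     Union of intervals (stack-based cascade merge):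
--     walk the intervals in decreasing start order, cascading each new
--     interval into the stack of already-merged intervals to its right.
--     '''
--     stack = []  # merged (start, end) pairs, smallest start on top
--     for c, d in sorted(x, reverse=True):
--         while stack and stack[-1][0] <= d:
--             d = max(d, stack.pop()[1])
--         stack.append((c, d))
--     return [[a, b] for a, b in reversed(stack)]
-- ===== Notes on version B (the rewrite author's own statement) =====
-- stated objective: alternative
-- what changed: A does one forward merge scan over the sorted intervals, carrying a running interval (a,b) and flushing it on a gap; B walks the intervals in decreasing start order and cascades each into a stack of already-merged intervals, popping every stacked interval whose start it reaches and keeping the max end.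
-- outside the precondition, e.g. on interval_union([]): A raises IndexError, B returns []
import Mathlib
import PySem

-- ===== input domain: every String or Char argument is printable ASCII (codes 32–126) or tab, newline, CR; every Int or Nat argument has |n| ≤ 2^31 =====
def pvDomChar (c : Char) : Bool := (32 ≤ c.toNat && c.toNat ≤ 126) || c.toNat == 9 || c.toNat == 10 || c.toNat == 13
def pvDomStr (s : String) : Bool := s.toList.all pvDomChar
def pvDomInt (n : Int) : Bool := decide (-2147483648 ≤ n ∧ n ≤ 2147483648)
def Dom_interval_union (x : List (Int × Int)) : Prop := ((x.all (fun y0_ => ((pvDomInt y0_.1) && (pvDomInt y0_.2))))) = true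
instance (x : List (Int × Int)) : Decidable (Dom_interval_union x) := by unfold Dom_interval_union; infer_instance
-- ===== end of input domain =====

-- B replaces A's single forward merge scan (running interval (a,b), flush on gap) by a
-- stack-based cascade: intervals are taken in decreasing start order and each one cascades
-- into the stack of already-merged intervals, popping every interval it reaches; same
-- O(n log n) cost (objective: alternative).

-- ===== PORT A =====
-- A's while loop: pop from the end of the reverse-sorted list, merging into (a, b).
def pvALoop (z : List (Int × Int)) (a b : Int) (res : List (List Int)) : List (List Int) :=
  match h : PySem.List.pop? z with
  | none => res ++ [[a, b]]
  | some ((c, d), z') =>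
    if c ≤ b then pvALoop z' a (max b d) res
    else pvALoop z' c d (res ++ [[a, b]])
termination_by z.length
decreasing_by
  all_goals
    have := PySem.List.length_of_pop?_eq_some z h
    simp_all; omega

def interval_union (x : List (Int × Int)) : List (List Int) :=
  let z := PySem.List.sorted2 x (fun p => p.1) (fun p => p.2) true
  match PySem.List.pop? z with
  | none => []          -- Python raises IndexError here (empty x); excluded by Pre_interval_union
  | some ((a, b), z') => pvALoop z' a b []

-- ===== PORT B =====
-- B's inner while loop: pop stacked intervals whose start is ≤ d, keeping the max end.
def pvBWhile (stack : List (Int × Int)) (d : Int) : List (Int × Int) × Int :=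
  match h : stack.getLast? with
  | none => (stack, d)
  | some (s, e) => if s ≤ d then pvBWhile stack.dropLast (max d e) else (stack, d)
termination_by stack.length
decreasing_by
  have hne : stack ≠ [] := by intro hn; subst hn; simp at h
  have : 0 < stack.length := List.length_pos_of_ne_nil hne
  simp [List.length_dropLast]; omega

-- one iteration of B's for loop: cascade (c, d) into the stack, then push
def pvBStep (stack : List (Int × Int)) (p : Int × Int) : List (Int × Int) :=
  let r := pvBWhile stack p.2
  r.1 ++ [(p.1, r.2)]

def interval_union_alt (x : List (Int × Int)) : List (List Int) :=
  let stack := (PySem.List.sorted2 x (fun p => p.1) (fun p => p.2) true).foldl pvBStep []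
  stack.reverse.map (fun p => [p.1, p.2])

-- ===== PRECONDITION & SPEC =====
-- Pre_ excludes only the empty list, on which A raises IndexError (z.pop() on an empty list);
-- B returns [] there.
def Pre_interval_union (x : List (Int × Int)) : Prop := x ≠ []
instance (x : List (Int × Int)) : Decidable (Pre_interval_union x) := by unfold Pre_interval_union; infer_instance
def pvWitness_interval_union : (List (Int × Int)) := [(0, 1)]

def Spec_interval_union (x : List (Int × Int)) (out : List (List Int)) : Prop := out = interval_union_alt x
instance (x : List (Int × Int)) (out : List (List Int)) : Decidable (Spec_interval_union x out) := by unfold Spec_interval_union; infer_instance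

-- ===== CLAIM (what is proved, stated in full; the proofs are below) =====
def Claim_equal_interval_union : Prop := ∀ (x : List (Int × Int)), Dom_interval_union x → Pre_interval_union x → Spec_interval_union x (interval_union x)

-- ===== LEMMAS AND PROOFS =====

-- proof-side view of B's cascade: stack with its top at the HEAD
def pvCascade : Int → Int → List (Int × Int) → List (Int × Int)
  | c, d, [] => [(c, d)]
  | c, d, (s, e) :: u => if s ≤ d then pvCascade c (max d e) u else (c, d) :: (s, e) :: u

-- proof-side view of A's loop: forward merge scan over the ascending list
def pvMergeP : Int → Int → List (Int × Int) → List (Int × Int)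
  | a, b, [] => [(a, b)]
  | a, b, (c, d) :: t => if c ≤ b then pvMergeP a (max b d) t else (a, b) :: pvMergeP c d t

lemma pvCascade_pvCascade (u : List (Int × Int)) : ∀ (a b c d : Int),
    pvCascade a b (pvCascade c d u) =
      if c ≤ b then pvCascade a (max b d) u else (a, b) :: pvCascade c d u := by
  induction u with
  | nil => intro a b c d; by_cases hc : c ≤ b <;> simp [pvCascade, hc]
  | cons p u ih =>
    obtain ⟨s, e⟩ := p
    intro a b c d
    by_cases hs : s ≤ d
    · have hs' : s ≤ max b d := le_trans hs (le_max_right b d)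
      simp only [pvCascade, hs, if_pos, hs', ih]
      rw [max_assoc]
    · by_cases hc : c ≤ b <;> simp [pvCascade, hs, hc]

lemma pvMergeP_eq_pvCascade (t : List (Int × Int)) : ∀ (a b : Int),
    pvMergeP a b t = pvCascade a b (t.foldr (fun p acc => pvCascade p.1 p.2 acc) []) := by
  induction t with
  | nil => intro a b; simp [pvMergeP, pvCascade]
  | cons p t ih =>
    obtain ⟨c, d⟩ := p
    intro a b
    simp only [List.foldr_cons, pvCascade_pvCascade, pvMergeP]
    split_ifs with hc
    · exact ih a (max b d)
    · rw [ih c d]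

lemma pvALoop_eq (z : List (Int × Int)) : ∀ (a b : Int) (res : List (List Int)),
    pvALoop z a b res = res ++ (pvMergeP a b z.reverse).map (fun p => [p.1, p.2]) := by
  induction z using List.reverseRecOn with
  | nil => intro a b res; rw [pvALoop]; simp [PySem.List.pop?, PySem.List.pyIdx?, pvMergeP]
  | append_singleton q p ih =>
    obtain ⟨c, d⟩ := p
    intro a b res
    rw [pvALoop]
    rw [PySem.List.pop?_last]
    simp only [List.reverse_append, List.reverse_cons, List.reverse_nil, List.nil_append,
      List.cons_append, pvMergeP]
    split_ifs with hc
    · rw [ih]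
    · rw [ih, List.map_cons, List.append_assoc, List.singleton_append]

lemma pvBWhile_reverse (st : List (Int × Int)) : ∀ (d c : Int),
    ((pvBWhile st d).1 ++ [(c, (pvBWhile st d).2)]).reverse = pvCascade c d st.reverse := by
  induction st using List.reverseRecOn with
  | nil => intro d c; rw [pvBWhile]; simp [pvCascade]
  | append_singleton q p ih =>
    obtain ⟨s, e⟩ := p
    intro d c
    rw [pvBWhile]
    rw [List.getLast?_concat]
    by_cases hs : s ≤ d
    · simp only [hs, if_true, List.dropLast_concat]
      rw [ih]
      simp [pvCascade, hs]
    · simp only [hs, if_false]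
      simp [pvCascade, hs]

lemma pvFoldl_pvBStep_reverse (zs : List (Int × Int)) : ∀ (st : List (Int × Int)),
    (zs.foldl pvBStep st).reverse =
      zs.reverse.foldr (fun p acc => pvCascade p.1 p.2 acc) st.reverse := by
  induction zs with
  | nil => intro st; simp
  | cons p t ih =>
    intro st
    simp only [List.foldl_cons, List.reverse_cons, List.foldr_append, List.foldr_cons,
      List.foldr_nil]
    rw [ih]
    congr 1
    exact pvBWhile_reverse st p.2 p.1

-- ===== VERDICT (by name: the statement is the Claim_ definition above) =====
theorem interval_union_spec : Claim_equal_interval_union := by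
  intro x _ hpre
  unfold Spec_interval_union interval_union interval_union_alt
  set zs := PySem.List.sorted2 x (fun p => p.1) (fun p => p.2) true with hzs
  have hne : zs ≠ [] := by
    intro h
    have hp := PySem.List.sorted2_perm x (fun p => p.1) (fun p => p.2) true
    rw [← hzs, h] at hp
    exact hpre (hp.nil_eq).symm
  rcases List.eq_nil_or_concat zs with h | ⟨q, p, h⟩
  · exact absurd h hne
  · obtain ⟨c, d⟩ := p
    rw [List.concat_eq_append] at h
    rw [h]
    show (match PySem.List.pop? (q ++ [(c, d)]) with
          | none => ([] : List (List Int))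
          | some ((a, b), z') => pvALoop z' a b []) =
      ((q ++ [(c, d)]).foldl pvBStep []).reverse.map (fun p => [p.1, p.2])
    rw [PySem.List.pop?_last]
    show pvALoop q c d [] = ((q ++ [(c, d)]).foldl pvBStep []).reverse.map (fun p => [p.1, p.2])
    rw [pvALoop_eq, pvFoldl_pvBStep_reverse]
    simp only [List.reverse_append, List.reverse_cons, List.reverse_nil, List.nil_append,
      List.singleton_append, List.foldr_cons]
    rw [← pvMergeP_eq_pvCascade]
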